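-- pv_equiv track=rewrite | github.com/tomasvanagas/prime-research | experiments/circuit_complexity/prime_indicator_anf.py | format_monomial
-- ===== SOURCE A (Python) =====
-- def format_monomial(idx, N):
--     """Format a monomial index as x_i * x_j * ..."""
--     bits = []
--     for i in range(N):
--         if idx & (1 << i):
--             bits.append(f"x{i}")
--     if not bits:
--         return "1"
--     return "*".join(bits)
-- ===== SOURCE B (Python) =====
-- def format_monomial(idx, N):
--     """Format a monomial index as x_i * x_j * ..."""
--     if N <= 0:
--         return "1"
--     m = idx & ((1 << N) - 1)
--     if m == 0:
--         return "1"
--     terms = []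
--     while m:
--         b = m.bit_length() - 1
--         terms.append("x%d" % b)
--         m -= 1 << b
--     return "*".join(reversed(terms))
-- ===== Notes on version B (the rewrite author's own statement) =====
-- stated objective: faster
-- what changed: Instead of scanning all N bit positions with a shifted-mask test, B masks idx to its low N bits once and then repeatedly peels the HIGHEST set bit via bit_length(), collecting terms back-to-front and reversing, so the loop runs once per set bit (at most bit_length(idx) times) rather than N times.
import Mathlib
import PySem

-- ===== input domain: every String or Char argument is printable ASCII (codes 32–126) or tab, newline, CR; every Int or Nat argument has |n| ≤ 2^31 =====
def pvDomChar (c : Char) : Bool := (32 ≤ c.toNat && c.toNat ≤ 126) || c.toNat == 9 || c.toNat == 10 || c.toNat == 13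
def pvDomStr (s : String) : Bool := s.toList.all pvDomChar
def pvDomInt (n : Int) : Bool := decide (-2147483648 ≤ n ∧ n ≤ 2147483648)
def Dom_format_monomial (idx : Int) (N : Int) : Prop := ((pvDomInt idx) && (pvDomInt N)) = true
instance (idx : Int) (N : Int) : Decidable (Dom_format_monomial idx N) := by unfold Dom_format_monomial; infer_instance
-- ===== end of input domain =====

-- B masks idx to its low N bits once, then peels the HIGHEST set bit with bit_length()
-- each step, building the terms back-to-front and reversing at the end: it visits only
-- the set bits instead of scanning all N positions.

-- ===== PORT A =====
def format_monomial (idx : Int) (N : Int) : String :=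
  let bits := (PySem.List.pyRange 0 N 1).foldl
    (fun bits i => if PySem.Int.band idx ((1:Int) <<< i) ≠ 0 then bits ++ ["x" ++ PySem.Int.toStr i] else bits) []
  if bits = [] then "1" else PySem.Str.join "*" bits

-- ===== PORT B =====
-- while m: b = m.bit_length() - 1; terms.append("x%d" % b); m -= 1 << b
-- (the guard is written 0 < m — the same test as Python's 'while m:' for every reachable
--  state, since m here is always the non-negative masked value; it makes the recursion total)
def hiLoop (m : Int) (terms : List String) : List String :=
  if _h : 0 < m then
    let b : Nat := PySem.Int.bitLength m - 1
    hiLoop (m - ((1 <<< b : Nat) : Int)) (terms ++ ["x" ++ PySem.Int.toStr (b : Int)])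
  else terms
  termination_by m.toNat
  decreasing_by
    have h1 := PySem.Int.two_pow_bitLength_le m (by omega)
    have h2 : m.natAbs = m.toNat := by omega
    have h3 : (0:Nat) < 2 ^ (PySem.Int.bitLength m - 1) := Nat.two_pow_pos _
    rw [Nat.shiftLeft_eq, one_mul]
    omega

def format_monomial_alt (idx : Int) (N : Int) : String :=
  if N ≤ 0 then "1"
  else
    let m := PySem.Int.band idx (((1 <<< N.toNat : Nat) : Int) - 1)
    if m = 0 then "1"
    else PySem.Str.join "*" (hiLoop m []).reverse

-- ===== PRECONDITION & SPEC =====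
def Spec_format_monomial (idx : Int) (N : Int) (out : String) : Prop := out = format_monomial_alt idx N
instance (idx : Int) (N : Int) (out : String) : Decidable (Spec_format_monomial idx N out) := by unfold Spec_format_monomial; infer_instance

-- ===== CLAIM (what is proved, stated in full; the proofs are below) =====
def Claim_equal_format_monomial : Prop := ∀ (idx : Int) (N : Int), Dom_format_monomial idx N → Spec_format_monomial idx N (format_monomial idx N)

-- ===== LEMMAS AND PROOFS =====

/-- Python's bit k of m under infinite two's complement. -/
def tbit (m : Int) (k : Nat) : Bool :=
  if 0 ≤ m then m.toNat.testBit k else !((-m - 1).toNat.testBit k)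

/-- The value of Python's `idx & ((1 << n) - 1)`, as a natural number. -/
def mval (idx : Int) (n : Nat) : Nat :=
  if 0 ≤ idx then idx.toNat % 2 ^ n else (2 ^ n - 1) - ((-idx - 1).toNat % 2 ^ n)

theorem foldl_collect {α β : Type} (p : α → Prop) [DecidablePred p] (f : α → β) :
    ∀ (l : List α) (acc : List β),
      l.foldl (fun a x => if p x then a ++ [f x] else a) acc
        = acc ++ (l.filter (fun x => decide (p x))).map f := by
  intro l
  induction l with
  | nil => simp
  | cons x xs ih =>
    intro acc
    by_cases h : p x <;> simp [h, ih]

theorem lemA (idx : Int) (k : Nat) :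
    decide (PySem.Int.band idx ((2 ^ k : Nat) : Int) ≠ 0) = tbit idx k := by
  have hp : (0:Nat) < 2 ^ k := Nat.two_pow_pos k
  unfold PySem.Int.band tbit
  by_cases h : 0 ≤ idx
  · rw [if_pos h, if_pos h, if_pos (by positivity : (0:Int) ≤ ((2^k : Nat) : Int))]
    simp only [Int.toNat_natCast, Nat.and_two_pow]
    rcases Bool.eq_false_or_eq_true (idx.toNat.testBit k) with hb | hb <;> simp [hb]
  · rw [if_neg h, if_neg h, if_pos (by positivity : (0:Int) ≤ ((2^k : Nat) : Int))]
    simp only [Int.toNat_natCast, Nat.two_pow_and]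
    set y := (-idx - 1).toNat with hy
    rcases Bool.eq_false_or_eq_true (y.testBit k) with hb | hb <;>
      rw [hb] <;> simp only [Bool.toNat_false, Bool.toNat_true, Nat.mul_zero, Nat.mul_one] <;>
      simp

/-- Python's `idx & ((1 << n) - 1)` is the natural number `mval idx n`. -/
theorem band_mask_eq (idx : Int) (n : Nat) :
    PySem.Int.band idx (((2 ^ n - 1 : Nat)) : Int) = ((mval idx n : Nat) : Int) := by
  have hp : (0:Nat) < 2 ^ n := Nat.two_pow_pos n
  unfold PySem.Int.band mval
  by_cases h : 0 ≤ idx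
  · rw [if_pos h, if_pos h, if_pos (by positivity : (0:Int) ≤ ((2^n - 1 : Nat) : Int))]
    simp only [Int.toNat_natCast]
    rw [Nat.and_two_pow_sub_one_eq_mod]
  · rw [if_neg h, if_neg h, if_pos (by positivity : (0:Int) ≤ ((2^n - 1 : Nat) : Int))]
    congr 1
    simp only [Int.toNat_natCast]
    rw [Nat.and_comm, Nat.and_two_pow_sub_one_eq_mod]

theorem mval_lt (idx : Int) (n : Nat) : mval idx n < 2 ^ n := by
  have hp : (0:Nat) < 2 ^ n := Nat.two_pow_pos n
  unfold mval
  by_cases h : 0 ≤ idx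
  · simpa [h] using Nat.mod_lt _ hp
  · have := Nat.mod_lt ((-idx - 1).toNat) hp
    simp [h]
    omega

/-- Complement within an n-bit mask, bit by bit. -/
theorem compl_testBit :
    ∀ (n x k : Nat), x < 2 ^ n → k < n → ((2 ^ n - 1 - x).testBit k) = !x.testBit k := by
  intro n
  induction n with
  | zero => omega
  | succ n ih =>
    intro x k hx hk
    have h2 : (2:Nat) ^ (n+1) = 2 * 2 ^ n := by ring
    cases k with
    | zero =>
      rw [Nat.testBit_zero, Nat.testBit_zero]
      have hp : (0:Nat) < 2 ^ n := Nat.two_pow_pos n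
      rcases Nat.even_or_odd x with he | ho
      · have : x % 2 = 0 := Nat.even_iff.mp he
        have : (2 ^ (n+1) - 1 - x) % 2 = 1 := by omega
        simp_all
      · have : x % 2 = 1 := Nat.odd_iff.mp ho
        have : (2 ^ (n+1) - 1 - x) % 2 = 0 := by omega
        simp_all
    | succ k =>
      rw [Nat.testBit_add_one, Nat.testBit_add_one]
      have hp : (0:Nat) < 2 ^ n := Nat.two_pow_pos n
      have hdiv : (2 ^ (n+1) - 1 - x) / 2 = 2 ^ n - 1 - x / 2 := by omega
      rw [hdiv]
      exact ih (x / 2) k (by omega) (by omega)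

/-- The masked value has exactly Python's bits of idx below n. -/
theorem mval_testBit (idx : Int) (n k : Nat) (hk : k < n) :
    (mval idx n).testBit k = tbit idx k := by
  unfold mval tbit
  by_cases h : 0 ≤ idx
  · simp [h, Nat.testBit_mod_two_pow, hk]
  · rw [if_neg h, if_neg h]
    have hlt : (-idx - 1).toNat % 2 ^ n < 2 ^ n := Nat.mod_lt _ (Nat.two_pow_pos n)
    rw [compl_testBit n _ k hlt hk, Nat.testBit_mod_two_pow]
    simp [hk]

/-- Bits at or above a bound that dominates x do not change the filtered range. -/
theorem filter_range_stable (x j k : Nat) (hjk : j ≤ k) (hx : x < 2 ^ j) :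
    (List.range k).filter x.testBit = (List.range j).filter x.testBit := by
  have hk : k = j + (k - j) := by omega
  rw [hk, List.range_add, List.filter_append]
  have hnil : ((List.range (k - j)).map (fun i => j + i)).filter x.testBit = [] := by
    rw [List.filter_eq_nil_iff]
    intro a ha
    simp only [List.mem_map] at ha
    obtain ⟨i, _, rfl⟩ := ha
    have : x < 2 ^ (j + i) := lt_of_lt_of_le hx (Nat.pow_le_pow_right (by omega) (by omega))
    simp [Nat.testBit_lt_two_pow this]
  rw [hnil, List.append_nil]

theorem bitLength_le_of_lt (x j : Nat) (hx : x < 2 ^ j) :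
    PySem.Int.bitLength (x : Int) ≤ j := by
  by_cases h0 : x = 0
  · simp [h0, PySem.Int.bitLength_zero]
  · by_contra hgt
    have h1 := PySem.Int.two_pow_bitLength_le (x : Int) (by exact_mod_cast h0)
    have h2 : (2:Nat) ^ j ≤ 2 ^ (PySem.Int.bitLength (x:Int) - 1) :=
      Nat.pow_le_pow_right (by omega) (by omega)
    simp only [Int.natAbs_natCast] at h1
    omega

/-- hiLoop collects the set-bit positions of a non-negative value, highest first. -/
theorem hiLoop_eq :
    ∀ (n : Nat) (acc : List String),
      hiLoop (n : Int) acc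
        = acc ++ (((List.range (PySem.Int.bitLength (n : Int))).filter n.testBit).reverse.map
            (fun i : Nat => "x" ++ PySem.Int.toStr (i : Int))) := by
  intro n
  induction n using Nat.strong_induction_on with
  | _ n ih =>
    intro acc
    by_cases h0 : n = 0
    · subst h0
      unfold hiLoop
      simp [PySem.Int.bitLength_zero]
    · have hpos : (0:Int) < (n : Int) := by exact_mod_cast Nat.pos_of_ne_zero h0
      unfold hiLoop
      rw [dif_pos hpos]
      set bl := PySem.Int.bitLength (n : Int) with hbl
      have hble := PySem.Int.two_pow_bitLength_le (n : Int) (by exact_mod_cast h0)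
      have hblt := PySem.Int.lt_two_pow_bitLength (n : Int)
      simp only [Int.natAbs_natCast, ← hbl] at hble hblt
      have hbl1 : 1 ≤ bl := by
        by_contra hc
        have : bl = 0 := by omega
        rw [this] at hblt
        omega
      set b := bl - 1 with hb
      have hlow : 2 ^ b ≤ n := hble
      have hhigh : n < 2 ^ (b + 1) := by
        have : b + 1 = bl := by omega
        rw [this]; exact hblt
      have hcast : (n : Int) - ((1 <<< b : Nat) : Int) = ((n - 2 ^ b : Nat) : Int) := by
        rw [Nat.shiftLeft_eq, one_mul]
        push_cast [Nat.cast_sub hlow]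
        ring
      show hiLoop ((n:Int) - ((1 <<< b : Nat) : Int)) (acc ++ ["x" ++ PySem.Int.toStr (b:Int)])
          = acc ++ (((List.range bl).filter n.testBit).reverse.map
              (fun i : Nat => "x" ++ PySem.Int.toStr (i : Int)))
      rw [hcast, ih (n - 2 ^ b) (by have := Nat.two_pow_pos b; omega)]
      -- rewrite the RHS filter
      have hrange : List.range bl = List.range b ++ [b] := by
        have : bl = b + 1 := by omega
        rw [this]; exact List.range_succ
      have htb : n.testBit b = true := by
        rw [Nat.testBit_eq_decide_div_mod_eq]
        have hdiv : n / 2 ^ b = 1 := Nat.div_eq_of_lt_le (by omega) (by omega)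
        simp [hdiv]
      set n' := n - 2 ^ b with hn'
      have hbits : ∀ k, k < b → n'.testBit k = n.testBit k := by
        intro k hk
        have hmod : n % 2 ^ b = n' := by
          rw [Nat.mod_eq_sub_mod hlow]
          exact Nat.mod_eq_of_lt (by have := Nat.two_pow_pos b; omega)
        have h1 : n'.testBit k = (n % 2 ^ b).testBit k := by rw [hmod]
        rw [h1, Nat.testBit_mod_two_pow]
        simp [hk]
      have hn'lt : n' < 2 ^ b := by omega
      have hstab : (List.range b).filter n.testBit
          = (List.range (PySem.Int.bitLength (n' : Int))).filter n'.testBit := by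
        have h1 : (List.range b).filter n.testBit = (List.range b).filter n'.testBit := by
          apply List.filter_congr
          intro k hkmem
          rw [List.mem_range] at hkmem
          rw [hbits k hkmem]
        rw [h1]
        exact filter_range_stable n' (PySem.Int.bitLength (n' : Int)) b
          (bitLength_le_of_lt n' b hn'lt)
          (by have := PySem.Int.lt_two_pow_bitLength (n' : Int)
              simpa using this)
      rw [hrange, List.filter_append]
      simp only [List.filter_cons, htb, if_pos, List.filter_nil]
      rw [List.reverse_append, hstab]
      simp

/-- Port A's collected list, as a filter over the bit positions. -/
theorem bitsA_eq (idx : Int) (n : Nat) :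
    (PySem.List.pyRange 0 (n:Int) 1).foldl
      (fun bits i => if PySem.Int.band idx ((1:Int) <<< i) ≠ 0 then bits ++ ["x" ++ PySem.Int.toStr i] else bits) []
      = ((List.range n).filter (fun k => tbit idx k)).map
          (fun k : Nat => "x" ++ PySem.Int.toStr (k : Int)) := by
  rw [PySem.List.pyRange_one]
  have h1 : ((n : Int) - 0).toNat = n := by omega
  rw [h1, List.foldl_map]
  rw [foldl_collect (fun k : Nat => PySem.Int.band idx ((1:Int) <<< ((0:Int) + (k:Int))) ≠ 0)
    (fun k : Nat => "x" ++ PySem.Int.toStr ((0:Int) + (k:Int)))]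
  simp only [List.nil_append, zero_add]
  congr 1
  apply List.filter_congr
  intro k _
  rw [Int.one_shiftLeft, lemA]

-- ===== VERDICT (by name: the statement is the Claim_ definition above) =====
theorem format_monomial_spec : Claim_equal_format_monomial := by
  intro idx N _
  unfold Spec_format_monomial format_monomial format_monomial_alt
  by_cases hN : N ≤ 0
  · rw [if_pos hN]
    have hA : PySem.List.pyRange 0 N 1 = [] := PySem.List.pyRange_one_eq_nil (by omega)
    rw [hA]
    simp
  · rw [if_neg hN]
    obtain ⟨n, hn⟩ : ∃ n : Nat, N = (n : Int) := ⟨N.toNat, by omega⟩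
    subst hn
    have hmask : (((1 <<< ((n:Int)).toNat : Nat) : Int)) - 1 = ((2 ^ n - 1 : Nat) : Int) := by
      rw [Int.toNat_natCast, Nat.shiftLeft_eq, one_mul]
      push_cast [Nat.cast_sub (Nat.one_le_two_pow)]
      ring
    rw [bitsA_eq idx n]
    simp only [hmask, band_mask_eq idx n]
    set mv := mval idx n with hmv
    have hfilt : (List.range n).filter (fun k => tbit idx k)
        = (List.range n).filter mv.testBit := by
      apply List.filter_congr
      intro k hkmem
      rw [List.mem_range] at hkmem
      rw [mval_testBit idx n k hkmem]
    by_cases hz : mv = 0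
    · have : (List.range n).filter (fun k => tbit idx k) = [] := by
        rw [hfilt, hz]
        simp [Nat.zero_testBit]
      rw [this]
      simp [hz]
    · have hmne : ((mv : Nat) : Int) ≠ 0 := by exact_mod_cast hz
      rw [if_neg hmne]
      have hL : (hiLoop ((mv : Nat) : Int) []).reverse
          = ((List.range (PySem.Int.bitLength (mv : Int))).filter mv.testBit).map
              (fun i : Nat => "x" ++ PySem.Int.toStr (i : Int)) := by
        rw [hiLoop_eq mv []]
        simp [List.map_reverse]
      have hstab : (List.range (PySem.Int.bitLength (mv : Int))).filter mv.testBit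
          = (List.range n).filter mv.testBit := by
        rw [filter_range_stable mv (PySem.Int.bitLength (mv : Int)) n
          (bitLength_le_of_lt mv n (mval_lt idx n))
          (by have := PySem.Int.lt_two_pow_bitLength (mv : Int); simpa using this)]
      have hne : (List.range n).filter (fun k => tbit idx k) ≠ [] := by
        rw [hfilt]
        intro hnil
        apply hz
        apply Nat.eq_of_testBit_eq
        intro i
        rw [Nat.zero_testBit]
        by_cases hi : i < n
        · have := List.filter_eq_nil_iff.mp hnil i (List.mem_range.mpr hi)
          simpa using this
        · exact Nat.testBit_lt_two_pow (lt_of_lt_of_le (mval_lt idx n)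
            (Nat.pow_le_pow_right (by omega) (by omega)))
      rw [if_neg (by simpa using hne)]
      rw [hL, hstab, hfilt]
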